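-- pv_equiv track=rewrite | github.com/Santh0shKr1shna/advent-of-code | 2025/Day03/main.py | part_one
-- ===== SOURCE A (Python) =====
-- def part_one(banks):
--     res = 0
--
--     for bank in banks:
--         maxi = 0
--
--         for i in range(len(bank) - 1):
--             maxi = max(maxi, bank[i]*10 + max(bank[(i+1):]))
--
--         res += maxi
--
--     return res
-- ===== SOURCE B (Python) =====
-- def part_one(banks):
--     res = 0
--     for bank in banks:
--         best = 0
--         suf = None  # max of the elements already seen (i.e. to the right)
--         for x in reversed(bank):
--             if suf is None:
--                 suf = x
--             else:
--                 best = max(best, x * 10 + suf)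
--                 suf = max(suf, x)
--         res += best
--     return res
-- ===== Notes on version B (the rewrite author's own statement) =====
-- stated objective: faster
-- what changed: Replaces the per-index rescan max(bank[i+1:]) with a single right-to-left pass that maintains the running suffix maximum, making each bank linear instead of quadratic.
import Mathlib
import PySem

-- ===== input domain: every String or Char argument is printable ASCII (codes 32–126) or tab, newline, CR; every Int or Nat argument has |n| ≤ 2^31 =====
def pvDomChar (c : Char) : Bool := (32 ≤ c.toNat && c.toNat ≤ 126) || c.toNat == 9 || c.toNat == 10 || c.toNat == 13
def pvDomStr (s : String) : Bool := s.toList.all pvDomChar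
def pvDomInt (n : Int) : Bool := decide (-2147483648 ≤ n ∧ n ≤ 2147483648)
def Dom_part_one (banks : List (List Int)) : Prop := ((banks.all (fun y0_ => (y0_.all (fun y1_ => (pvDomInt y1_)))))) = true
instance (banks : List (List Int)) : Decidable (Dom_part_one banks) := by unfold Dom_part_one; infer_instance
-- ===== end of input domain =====

-- B replaces A's quadratic per-index rescan max(bank[i+1:]) with one right-to-left pass
-- keeping the running suffix maximum (objective: faster, asymptotic per bank).

-- ===== PORT A =====
-- inner loop of A: for i in range(len(bank)-1): maxi = max(maxi, bank[i]*10 + max(bank[i+1:]))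
-- (max(bank[i+1:]) is on a nonempty list for every i the loop reaches, so the .getD 0 default is never used)
def part_one_inner (bank : List Int) : Int :=
  (PySem.List.pyRange 0 ((bank.length : Int) - 1) 1).foldl
    (fun maxi i =>
      max maxi (PySem.List.pyGetD bank i 0 * 10 +
        ((PySem.List.max? (PySem.List.slice bank (some (i + 1)) none) (fun x => x)).getD 0)))
    0

def part_one (banks : List (List Int)) : Int :=
  banks.foldl (fun res bank => res + part_one_inner bank) 0

-- ===== PORT B =====
-- one step of B's right-to-left pass: state = (best so far, suffix maximum so far or None)
def part_one_alt_step (st : Int × Option Int) (x : Int) : Int × Option Int :=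
  match st.2 with
  | none => (st.1, some x)
  | some s => (max st.1 (x * 10 + s), some (max s x))

def part_one_alt (banks : List (List Int)) : Int :=
  banks.foldl (fun res bank => res + (bank.reverse.foldl part_one_alt_step (0, none)).1) 0

-- ===== PRECONDITION & SPEC =====
def Spec_part_one (banks : List (List Int)) (out : Int) : Prop := out = part_one_alt banks
instance (banks : List (List Int)) (out : Int) : Decidable (Spec_part_one banks out) := by unfold Spec_part_one; infer_instance

-- ===== CLAIM (what is proved, stated in full; the proofs are below) =====
def Claim_equal_part_one : Prop := ∀ (banks : List (List Int)), Dom_part_one banks → Spec_part_one banks (part_one banks)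

-- ===== LEMMAS AND PROOFS =====

-- reference value of the suffix maximum (second component of B's state)
def pvMaxOpt : List Int → Option Int
  | [] => none
  | x :: xs =>
    match pvMaxOpt xs with
    | none => some x
    | some s => some (max s x)

-- reference value of B's inner result
def pvSpecB : List Int → Int
  | [] => 0
  | x :: xs =>
    match pvMaxOpt xs with
    | none => pvSpecB xs
    | some s => max (pvSpecB xs) (x * 10 + s)

theorem pv_foldl_congr {α β : Type} (l : List β) (f g : α → β → α) (init : α)
    (h : ∀ a b, b ∈ l → f a b = g a b) : l.foldl f init = l.foldl g init := by
  induction l generalizing init with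
  | nil => rfl
  | cons x xs ih =>
    rw [List.foldl_cons, List.foldl_cons, h init x List.mem_cons_self]
    exact ih _ (fun a b hb => h a b (List.mem_cons_of_mem _ hb))

theorem pvFoldrB (l : List Int) :
    l.foldr (fun x st => part_one_alt_step st x) (0, none) = (pvSpecB l, pvMaxOpt l) := by
  induction l with
  | nil => rfl
  | cons x xs ih =>
    rw [List.foldr_cons, ih]
    cases h : pvMaxOpt xs <;> simp [part_one_alt_step, pvSpecB, pvMaxOpt, h]

theorem pvMaxOpt_eq_none (l : List Int) : pvMaxOpt l = none ↔ l = [] := by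
  cases l with
  | nil => simp [pvMaxOpt]
  | cons x xs => simp [pvMaxOpt]; cases pvMaxOpt xs <;> simp

theorem pvMaxOpt_spec (l : List Int) (m : Int) (h : pvMaxOpt l = some m) :
    m ∈ l ∧ ∀ y ∈ l, y ≤ m := by
  induction l generalizing m with
  | nil => simp [pvMaxOpt] at h
  | cons x xs ih =>
    simp only [pvMaxOpt] at h
    cases hx : pvMaxOpt xs with
    | none =>
      rw [hx] at h
      have hx' : xs = [] := (pvMaxOpt_eq_none xs).mp hx
      simp at h
      subst hx' h
      simp
    | some s =>
      rw [hx] at h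
      simp at h
      obtain ⟨hs, hub⟩ := ih s hx
      constructor
      · rcases max_cases s x with ⟨he, _⟩ | ⟨he, _⟩ <;> rw [← h, he]
        · exact List.mem_cons_of_mem _ hs
        · exact List.mem_cons_self
      · intro y hy
        rcases List.mem_cons.mp hy with rfl | hy
        · rw [← h]; exact le_max_right _ _
        · rw [← h]; exact le_trans (hub y hy) (le_max_left _ _)

-- A's max(slice) agrees with pvMaxOpt on nonempty lists
theorem pvMax?_eq (l : List Int) (hl : l ≠ []) :
    PySem.List.max? l (fun x => x) = pvMaxOpt l := by
  cases h1 : PySem.List.max? l (fun x => x) with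
  | none => exact absurd ((PySem.List.max?_eq_none_iff l (fun x => x)).mp h1) hl
  | some m1 =>
    cases h2 : pvMaxOpt l with
    | none => exact absurd ((pvMaxOpt_eq_none l).mp h2) hl
    | some m2 =>
      obtain ⟨hm2, hub2⟩ := pvMaxOpt_spec l m2 h2
      have hm1 := PySem.List.max?_mem h1
      have hub1 := PySem.List.max?_isMax h1
      exact congrArg some (le_antisymm (hub2 m1 hm1) (hub1 m2 hm2))

theorem pv_foldl_max_init (l : List Nat) (f : Nat → Int) (c d : Int) :
    l.foldl (fun a k => max a (f k)) (max c d) = max (l.foldl (fun a k => max a (f k)) c) d := by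
  induction l generalizing c with
  | nil => rfl
  | cons b t ih =>
    simp only [List.foldl]
    rw [max_right_comm c d (f b), ih]

-- the A-side term at index k of a bank
def pvTermA (bank : List Int) (k : Nat) : Int :=
  PySem.List.pyGetD bank (k : Int) 0 * 10 +
    ((PySem.List.max? (PySem.List.slice bank (some ((k : Int) + 1)) none) (fun x => x)).getD 0)

theorem pv_innerA_range (bank : List Int) (init : Int) :
    (PySem.List.pyRange 0 ((bank.length : Int) - 1) 1).foldl
      (fun maxi i =>
        max maxi (PySem.List.pyGetD bank i 0 * 10 +
          ((PySem.List.max? (PySem.List.slice bank (some (i + 1)) none) (fun x => x)).getD 0)))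
      init
    = (List.range (bank.length - 1)).foldl (fun a k => max a (pvTermA bank k)) init := by
  have hlen : ((bank.length : Int) - 1 - 0).toNat = bank.length - 1 := by omega
  rw [PySem.List.pyRange_one, hlen, List.foldl_map]
  apply pv_foldl_congr
  intro a k _
  simp [pvTermA]

theorem pvTermA_shift (x : Int) (xs : List Int) (k : Nat) :
    pvTermA (x :: xs) (k + 1) = pvTermA xs k := by
  unfold pvTermA
  have h1 : PySem.List.pyGetD (x :: xs) ((k + 1 : Nat) : Int) 0 = PySem.List.pyGetD xs (k : Int) 0 := by
    rw [PySem.List.pyGetD_natCast, PySem.List.pyGetD_natCast]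
    rfl
  have h2 : PySem.List.slice (x :: xs) (some (((k + 1 : Nat) : Int) + 1)) none
      = PySem.List.slice xs (some ((k : Int) + 1)) none := by
    have e1 : ((k + 1 : Nat) : Int) + 1 = ((k + 2 : Nat) : Int) := by push_cast; ring
    have e2 : (k : Int) + 1 = ((k + 1 : Nat) : Int) := by push_cast; ring
    rw [e1, e2, PySem.List.slice_from_natCast, PySem.List.slice_from_natCast]
    rfl
  rw [h1, h2]

theorem pv_inner_eq (bank : List Int) : part_one_inner bank = pvSpecB bank := by
  induction bank with
  | nil => rfl
  | cons x xs ih =>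
    cases hxs : xs with
    | nil => rfl
    | cons y ys =>
      rw [← hxs]
      have hxs' : xs ≠ [] := by rw [hxs]; simp
      unfold part_one_inner
      rw [pv_innerA_range]
      have hl : (x :: xs).length - 1 = xs.length := by simp
      rw [hl]
      have hpos : 0 < xs.length := by rw [hxs]; simp
      obtain ⟨n, hn⟩ : ∃ n, xs.length = n + 1 := ⟨xs.length - 1, by omega⟩
      rw [hn, List.range_succ_eq_map, List.foldl_cons, List.foldl_map]
      have hterm0 : pvTermA (x :: xs) 0 = x * 10 + (pvMaxOpt xs).getD 0 := by
        unfold pvTermA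
        have e : PySem.List.slice (x :: xs) (some (((0 : Nat) : Int) + 1)) none = xs := by
          rw [show ((0 : Nat) : Int) + 1 = ((1 : Nat) : Int) by norm_num,
            PySem.List.slice_from_natCast]
          rfl
        rw [e, pvMax?_eq xs hxs', PySem.List.pyGetD_natCast]
        rfl
      have hshift : (List.range n).foldl (fun a k => max a (pvTermA (x :: xs) (k + 1))) (max 0 (pvTermA (x :: xs) 0))
          = (List.range n).foldl (fun a k => max a (pvTermA xs k)) (max 0 (pvTermA (x :: xs) 0)) := by
        apply pv_foldl_congr
        intro a k _
        simp only [pvTermA_shift]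
      rw [hshift, pv_foldl_max_init]
      have hinner : (List.range n).foldl (fun a k => max a (pvTermA xs k)) 0 = part_one_inner xs := by
        unfold part_one_inner
        rw [pv_innerA_range]
        have : xs.length - 1 = n := by omega
        rw [this]
      rw [hinner, ih, hterm0]
      cases hm : pvMaxOpt xs with
      | none => exact absurd ((pvMaxOpt_eq_none xs).mp hm) hxs'
      | some s =>
        simp only [pvSpecB, hm, Option.getD_some]

theorem pv_alt_inner (bank : List Int) :
    (bank.reverse.foldl part_one_alt_step (0, none)).1 = pvSpecB bank := by
  rw [List.foldl_reverse, pvFoldrB]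

-- ===== VERDICT (by name: the statement is the Claim_ definition above) =====
theorem part_one_spec : Claim_equal_part_one := by
  intro banks _
  unfold Spec_part_one part_one part_one_alt
  have : (fun (res : Int) (bank : List Int) => res + part_one_inner bank)
      = (fun res bank => res + (bank.reverse.foldl part_one_alt_step (0, none)).1) := by
    funext res bank
    rw [pv_inner_eq, pv_alt_inner]
  rw [this]
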